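-- pv_equiv track=rewrite | github.com/leidc024/Thesis | scripts/01_find_ambiguous_pairs.py | latin_to_baybayin
-- ===== SOURCE A (Python) =====
-- def latin_to_baybayin(text):
--     """
--     Converts Latin script Filipino text to Baybayin script.
--     Simplified version focusing on ambiguity detection.
--     """
--     baybayin_chars = {
--         # Independent vowels
--         'a': 'ᜀ', 'e': 'ᜁ', 'i': 'ᜁ', 'o': 'ᜂ', 'u': 'ᜂ',
--
--         # Consonants with 'a' (inherent vowel)
--         'ka': 'ᜃ', 'ga': 'ᜄ', 'nga': 'ᜅ',
--         'ta': 'ᜆ', 'da': 'ᜇ', 'ra': 'ᜇ', 'na': 'ᜈ',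
--         'pa': 'ᜉ', 'ba': 'ᜊ', 'ma': 'ᜋ',
--         'ya': 'ᜌ', 'la': 'ᜎ', 'wa': 'ᜏ',
--         'sa': 'ᜐ', 'ha': 'ᜑ',
--
--         # Consonants with 'i' or 'e'
--         'ki': 'ᜃᜒ', 'ke': 'ᜃᜒ', 'gi': 'ᜄᜒ', 'ge': 'ᜄᜒ',
--         'ngi': 'ᜅᜒ', 'nge': 'ᜅᜒ', 'ti': 'ᜆᜒ', 'te': 'ᜆᜒ',
--         'di': 'ᜇᜒ', 'de': 'ᜇᜒ', 'ri': 'ᜇᜒ', 're': 'ᜇᜒ',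
--         'ni': 'ᜈᜒ', 'ne': 'ᜈᜒ', 'pi': 'ᜉᜒ', 'pe': 'ᜉᜒ',
--         'bi': 'ᜊᜒ', 'be': 'ᜊᜒ', 'mi': 'ᜋᜒ', 'me': 'ᜋᜒ',
--         'yi': 'ᜌᜒ', 'ye': 'ᜌᜒ', 'li': 'ᜎᜒ', 'le': 'ᜎᜒ',
--         'wi': 'ᜏᜒ', 'we': 'ᜏᜒ', 'si': 'ᜐᜒ', 'se': 'ᜐᜒ',
--         'hi': 'ᜑᜒ', 'he': 'ᜑᜒ',
--
--         # Consonants with 'u' or 'o'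
--         'ku': 'ᜃᜓ', 'ko': 'ᜃᜓ', 'gu': 'ᜄᜓ', 'go': 'ᜄᜓ',
--         'ngu': 'ᜅᜓ', 'ngo': 'ᜅᜓ', 'tu': 'ᜆᜓ', 'to': 'ᜆᜓ',
--         'du': 'ᜇᜓ', 'do': 'ᜇᜓ', 'ru': 'ᜇᜓ', 'ro': 'ᜇᜓ',
--         'nu': 'ᜈᜓ', 'no': 'ᜈᜓ', 'pu': 'ᜉᜓ', 'po': 'ᜉᜓ',
--         'bu': 'ᜊᜓ', 'bo': 'ᜊᜓ', 'mu': 'ᜋᜓ', 'mo': 'ᜋᜓ',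
--         'yu': 'ᜌᜓ', 'yo': 'ᜌᜓ', 'lu': 'ᜎᜓ', 'lo': 'ᜎᜓ',
--         'wu': 'ᜏᜓ', 'wo': 'ᜏᜓ', 'su': 'ᜐᜓ', 'so': 'ᜐᜓ',
--         'hu': 'ᜑᜓ', 'ho': 'ᜑᜓ',
--
--         # Consonants with virama (cancels inherent vowel)
--         'k': 'ᜃ᜔', 'g': 'ᜄ᜔', 'ng': 'ᜅ᜔',
--         't': 'ᜆ᜔', 'd': 'ᜇ᜔', 'r': 'ᜇ᜔', 'n': 'ᜈ᜔',
--         'p': 'ᜉ᜔', 'b': 'ᜊ᜔', 'm': 'ᜋ᜔',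
--         'y': 'ᜌ᜔', 'l': 'ᜎ᜔', 'w': 'ᜏ᜔',
--         's': 'ᜐ᜔', 'h': 'ᜑ᜔',
--     }
--
--     text = text.lower()
--     result = []
--     i = 0
--
--     while i < len(text):
--         if text[i] == ' ':
--             result.append(' ')
--             i += 1
--             continue
--
--         matched = False
--
--         # Try 3-character match (for 'nga', 'ngi', etc.)
--         if i + 2 < len(text):
--             three_char = text[i:i+3]
--             if three_char in baybayin_chars:
--                 result.append(baybayin_chars[three_char])
--                 i += 3
--                 matched = True
--                 continue
--
--         # Try 2-character match
--         if i + 1 < len(text):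
--             two_char = text[i:i+2]
--             if two_char in baybayin_chars:
--                 result.append(baybayin_chars[two_char])
--                 i += 2
--                 matched = True
--                 continue
--
--         # Try 1-character match
--         one_char = text[i]
--         if one_char in baybayin_chars:
--             result.append(baybayin_chars[one_char])
--             i += 1
--             matched = True
--         else:
--             # Keep original if no match (numbers, punctuation)
--             result.append(one_char)
--             i += 1
--
--     return ''.join(result)
-- ===== SOURCE B (Python) =====
-- _BASE = {'k': '\u1703', 'g': '\u1704', 'ng': '\u1705',
--          't': '\u1706', 'd': '\u1707', 'r': '\u1707', 'n': '\u1708',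
--          'p': '\u1709', 'b': '\u170A', 'm': '\u170B',
--          'y': '\u170C', 'l': '\u170E', 'w': '\u170F',
--          's': '\u1710', 'h': '\u1711'}
-- _INDEP = {'a': '\u1700', 'e': '\u1701', 'i': '\u1701', 'o': '\u1702', 'u': '\u1702'}
-- _SIGN = {'a': '', 'e': '\u1712', 'i': '\u1712', 'o': '\u1713', 'u': '\u1713'}
--
--
-- def _step(t, i):
--     """One syllable starting at i: returns (output piece, next position)."""
--     n = len(t)
--     c = t[i]
--     cons = 'ng' if c == 'n' and i + 1 < n and t[i + 1] == 'g' else c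
--     if cons in _BASE:
--         j = i + len(cons)
--         if j < n and t[j] in _SIGN:
--             return _BASE[cons] + _SIGN[t[j]], j + 1   # consonant + vowel diacritic
--         return _BASE[cons] + '\u1714', j              # bare consonant: virama
--     if c in _INDEP:
--         return _INDEP[c], i + 1                       # independent vowel
--     return c, i + 1                                   # anything else unchanged
--
--
-- def latin_to_baybayin(text):
--     """
--     Converts Latin script Filipino text to Baybayin script.
--     Compositional version: base consonant glyph + vowel diacritic / virama,
--     instead of one big syllable table with a 3/2/1-prefix position scan.
--     """
--     t = text.lower()
--     out = []
--     i = 0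
--     while i < len(t):
--         piece, i = _step(t, i)
--         out.append(piece)
--     return ''.join(out)
-- ===== Notes on version B (the rewrite author's own statement) =====
-- stated objective: simpler
-- what changed: A scans each position trying 3-, 2-, then 1-character prefixes against one 95-entry syllable table; B decomposes each syllable phonologically (15 base consonant glyphs plus the 'ng' digraph, then a vowel diacritic or a virama, and 5 independent vowels), so the big precomposed table and the longest-prefix scan disappear.
import Mathlib
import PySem

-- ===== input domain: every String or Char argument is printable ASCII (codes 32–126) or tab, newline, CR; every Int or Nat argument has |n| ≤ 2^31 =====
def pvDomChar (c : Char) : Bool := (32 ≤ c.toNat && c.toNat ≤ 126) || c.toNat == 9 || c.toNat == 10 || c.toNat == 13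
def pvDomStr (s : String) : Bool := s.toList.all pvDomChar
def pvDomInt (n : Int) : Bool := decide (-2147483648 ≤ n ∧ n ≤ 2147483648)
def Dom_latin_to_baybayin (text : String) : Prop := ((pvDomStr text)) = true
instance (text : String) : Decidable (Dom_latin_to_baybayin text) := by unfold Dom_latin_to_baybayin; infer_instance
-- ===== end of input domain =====

-- B replaces A's 95-entry syllable table and 3/2/1-prefix position scan by a compositional pass:
-- base consonant glyph (15 entries, plus the 'ng' digraph) + vowel diacritic or virama; objective: simpler.

-- ===== PORT A =====
-- Python str keys/slices are represented on the List Char side (PySem.Chars convention).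
def bayChars : PySem.Dict (List Char) String := PySem.Dict.mk [
  (['a'], "ᜀ"),
  (['e'], "ᜁ"),
  (['i'], "ᜁ"),
  (['o'], "ᜂ"),
  (['u'], "ᜂ"),
  (['k', 'a'], "ᜃ"),
  (['g', 'a'], "ᜄ"),
  (['n', 'g', 'a'], "ᜅ"),
  (['t', 'a'], "ᜆ"),
  (['d', 'a'], "ᜇ"),
  (['r', 'a'], "ᜇ"),
  (['n', 'a'], "ᜈ"),
  (['p', 'a'], "ᜉ"),
  (['b', 'a'], "ᜊ"),
  (['m', 'a'], "ᜋ"),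
  (['y', 'a'], "ᜌ"),
  (['l', 'a'], "ᜎ"),
  (['w', 'a'], "ᜏ"),
  (['s', 'a'], "ᜐ"),
  (['h', 'a'], "ᜑ"),
  (['k', 'i'], "ᜃᜒ"),
  (['k', 'e'], "ᜃᜒ"),
  (['g', 'i'], "ᜄᜒ"),
  (['g', 'e'], "ᜄᜒ"),
  (['n', 'g', 'i'], "ᜅᜒ"),
  (['n', 'g', 'e'], "ᜅᜒ"),
  (['t', 'i'], "ᜆᜒ"),
  (['t', 'e'], "ᜆᜒ"),
  (['d', 'i'], "ᜇᜒ"),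
  (['d', 'e'], "ᜇᜒ"),
  (['r', 'i'], "ᜇᜒ"),
  (['r', 'e'], "ᜇᜒ"),
  (['n', 'i'], "ᜈᜒ"),
  (['n', 'e'], "ᜈᜒ"),
  (['p', 'i'], "ᜉᜒ"),
  (['p', 'e'], "ᜉᜒ"),
  (['b', 'i'], "ᜊᜒ"),
  (['b', 'e'], "ᜊᜒ"),
  (['m', 'i'], "ᜋᜒ"),
  (['m', 'e'], "ᜋᜒ"),
  (['y', 'i'], "ᜌᜒ"),
  (['y', 'e'], "ᜌᜒ"),
  (['l', 'i'], "ᜎᜒ"),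
  (['l', 'e'], "ᜎᜒ"),
  (['w', 'i'], "ᜏᜒ"),
  (['w', 'e'], "ᜏᜒ"),
  (['s', 'i'], "ᜐᜒ"),
  (['s', 'e'], "ᜐᜒ"),
  (['h', 'i'], "ᜑᜒ"),
  (['h', 'e'], "ᜑᜒ"),
  (['k', 'u'], "ᜃᜓ"),
  (['k', 'o'], "ᜃᜓ"),
  (['g', 'u'], "ᜄᜓ"),
  (['g', 'o'], "ᜄᜓ"),
  (['n', 'g', 'u'], "ᜅᜓ"),
  (['n', 'g', 'o'], "ᜅᜓ"),
  (['t', 'u'], "ᜆᜓ"),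
  (['t', 'o'], "ᜆᜓ"),
  (['d', 'u'], "ᜇᜓ"),
  (['d', 'o'], "ᜇᜓ"),
  (['r', 'u'], "ᜇᜓ"),
  (['r', 'o'], "ᜇᜓ"),
  (['n', 'u'], "ᜈᜓ"),
  (['n', 'o'], "ᜈᜓ"),
  (['p', 'u'], "ᜉᜓ"),
  (['p', 'o'], "ᜉᜓ"),
  (['b', 'u'], "ᜊᜓ"),
  (['b', 'o'], "ᜊᜓ"),
  (['m', 'u'], "ᜋᜓ"),
  (['m', 'o'], "ᜋᜓ"),
  (['y', 'u'], "ᜌᜓ"),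
  (['y', 'o'], "ᜌᜓ"),
  (['l', 'u'], "ᜎᜓ"),
  (['l', 'o'], "ᜎᜓ"),
  (['w', 'u'], "ᜏᜓ"),
  (['w', 'o'], "ᜏᜓ"),
  (['s', 'u'], "ᜐᜓ"),
  (['s', 'o'], "ᜐᜓ"),
  (['h', 'u'], "ᜑᜓ"),
  (['h', 'o'], "ᜑᜓ"),
  (['k'], "ᜃ᜔"),
  (['g'], "ᜄ᜔"),
  (['n', 'g'], "ᜅ᜔"),
  (['t'], "ᜆ᜔"),
  (['d'], "ᜇ᜔"),
  (['r'], "ᜇ᜔"),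
  (['n'], "ᜈ᜔"),
  (['p'], "ᜉ᜔"),
  (['b'], "ᜊ᜔"),
  (['m'], "ᜋ᜔"),
  (['y'], "ᜌ᜔"),
  (['l'], "ᜎ᜔"),
  (['w'], "ᜏ᜔"),
  (['s'], "ᜐ᜔"),
  (['h'], "ᜑ᜔") ]

-- the while loop over index i, as recursion on the remaining characters (drop i)
def goA (l : List Char) : List String :=
  match l with
  | [] => []
  | c :: rest =>
    if c = ' ' then " " :: goA rest
    else
      -- try 3-character match (guard: i + 2 < len(text))
      match (if 2 < (c :: rest).length then bayChars.get? ((c :: rest).take 3) else none) with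
      | some v => v :: goA (rest.drop 2)
      | none =>
        -- try 2-character match (guard: i + 1 < len(text))
        match (if 1 < (c :: rest).length then bayChars.get? ((c :: rest).take 2) else none) with
        | some v => v :: goA (rest.drop 1)
        | none =>
          -- 1-character match, else keep the original character
          match bayChars.get? [c] with
          | some v => v :: goA rest
          | none => String.ofList [c] :: goA rest
termination_by l.length
decreasing_by all_goals (simp; try omega)

def latin_to_baybayin (text : String) : String :=
  PySem.Str.join "" (goA (PySem.Str.lower text).toList)

-- ===== PORT B =====
def altBase : PySem.Dict (List Char) String := PySem.Dict.mk [
  (['k'], "ᜃ"),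
  (['g'], "ᜄ"),
  (['n', 'g'], "ᜅ"),
  (['t'], "ᜆ"),
  (['d'], "ᜇ"),
  (['r'], "ᜇ"),
  (['n'], "ᜈ"),
  (['p'], "ᜉ"),
  (['b'], "ᜊ"),
  (['m'], "ᜋ"),
  (['y'], "ᜌ"),
  (['l'], "ᜎ"),
  (['w'], "ᜏ"),
  (['s'], "ᜐ"),
  (['h'], "ᜑ") ]

def altIndep : PySem.Dict Char String := PySem.Dict.mk [
  ('a', "ᜀ"),
  ('e', "ᜁ"),
  ('i', "ᜁ"),
  ('o', "ᜂ"),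
  ('u', "ᜂ") ]

def altSign : PySem.Dict Char String := PySem.Dict.mk [
  ('a', ""),
  ('e', "ᜒ"),
  ('i', "ᜒ"),
  ('o', "ᜓ"),
  ('u', "ᜓ") ]

-- _step(t, i): one syllable starting at i, on the remaining characters c :: rest (= drop i)
def altStep (c : Char) (rest : List Char) : String × List Char :=
  let cons : List Char := if c = 'n' ∧ rest.take 1 = ['g'] then ['n', 'g'] else [c]
  match altBase.get? cons with
  | some bs =>
    match (c :: rest).drop cons.length with     -- t[j:], j = i + len(cons)
    | v :: rest2 =>
      match altSign.get? v with
      | some sg => (bs ++ sg, rest2)            -- consonant + vowel diacritic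
      | none => (bs ++ "᜔", v :: rest2)         -- bare consonant: virama
    | [] => (bs ++ "᜔", [])
  | none =>
    match altIndep.get? c with
    | some iv => (iv, rest)                     -- independent vowel
    | none => (String.ofList [c], rest)         -- anything else unchanged

theorem altStep_len (c : Char) (rest : List Char) : (altStep c rest).2.length ≤ rest.length := by
  unfold altStep
  by_cases hng : c = 'n' ∧ rest.take 1 = ['g']
  · obtain ⟨hc, ht⟩ := hng
    subst hc
    rcases rest with _ | ⟨r0, rest'⟩
    · simp at ht
    · simp at ht
      subst ht
      simp only [List.take_succ_cons, List.take_zero, and_self, ite_true, List.length_cons,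
        List.drop_succ_cons]
      rw [show altBase.get? ['n','g'] = some "ᜅ" from rfl]
      simp only [List.length_nil, List.drop_zero]
      rcases rest' with _ | ⟨v, rest2⟩
      · simp
      · rcases hs : altSign.get? v with _ | sg <;> (simp [hs]; try omega)
  · simp only [hng, ite_false, List.length_cons, List.drop_succ_cons]
    rcases hb : altBase.get? [c] with _ | bs
    · rcases hi : altIndep.get? c with _ | iv <;> simp
    · rcases rest with _ | ⟨v, rest2⟩
      · simp
      · rcases hs : altSign.get? v with _ | sg <;> (simp [hs]; try omega)

-- the while loop: emit one piece, continue at the returned position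
def goB (l : List Char) : List String :=
  match l with
  | [] => []
  | c :: rest =>
    (altStep c rest).1 :: goB (altStep c rest).2
termination_by l.length
decreasing_by exact Nat.lt_succ_of_le (by simpa using altStep_len c rest)

def latin_to_baybayin_alt (text : String) : String :=
  PySem.Str.join "" (goB (PySem.Str.lower text).toList)

-- ===== PRECONDITION & SPEC =====
def Spec_latin_to_baybayin (text : String) (out : String) : Prop := out = latin_to_baybayin_alt text
instance (text : String) (out : String) : Decidable (Spec_latin_to_baybayin text out) := by unfold Spec_latin_to_baybayin; infer_instance

-- ===== CLAIM (what is proved, stated in full; the proofs are below) =====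
def Claim_equal_latin_to_baybayin : Prop := ∀ (text : String), Dom_latin_to_baybayin text → Spec_latin_to_baybayin text (latin_to_baybayin text)

-- ===== LEMMAS AND PROOFS =====

@[simp] theorem bayR_a : bayChars.get? ['a'] = some "ᜀ" := rfl

@[simp] theorem bayR_e : bayChars.get? ['e'] = some "ᜁ" := rfl

@[simp] theorem bayR_i : bayChars.get? ['i'] = some "ᜁ" := rfl

@[simp] theorem bayR_o : bayChars.get? ['o'] = some "ᜂ" := rfl

@[simp] theorem bayR_u : bayChars.get? ['u'] = some "ᜂ" := rfl

@[simp] theorem bayR_ka : bayChars.get? ['k', 'a'] = some "ᜃ" := rfl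

@[simp] theorem bayR_ga : bayChars.get? ['g', 'a'] = some "ᜄ" := rfl

@[simp] theorem bayR_nga : bayChars.get? ['n', 'g', 'a'] = some "ᜅ" := rfl

@[simp] theorem bayR_ta : bayChars.get? ['t', 'a'] = some "ᜆ" := rfl

@[simp] theorem bayR_da : bayChars.get? ['d', 'a'] = some "ᜇ" := rfl

@[simp] theorem bayR_ra : bayChars.get? ['r', 'a'] = some "ᜇ" := rfl

@[simp] theorem bayR_na : bayChars.get? ['n', 'a'] = some "ᜈ" := rfl

@[simp] theorem bayR_pa : bayChars.get? ['p', 'a'] = some "ᜉ" := rfl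

@[simp] theorem bayR_ba : bayChars.get? ['b', 'a'] = some "ᜊ" := rfl

@[simp] theorem bayR_ma : bayChars.get? ['m', 'a'] = some "ᜋ" := rfl

@[simp] theorem bayR_ya : bayChars.get? ['y', 'a'] = some "ᜌ" := rfl

@[simp] theorem bayR_la : bayChars.get? ['l', 'a'] = some "ᜎ" := rfl

@[simp] theorem bayR_wa : bayChars.get? ['w', 'a'] = some "ᜏ" := rfl

@[simp] theorem bayR_sa : bayChars.get? ['s', 'a'] = some "ᜐ" := rfl

@[simp] theorem bayR_ha : bayChars.get? ['h', 'a'] = some "ᜑ" := rfl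

@[simp] theorem bayR_ki : bayChars.get? ['k', 'i'] = some "ᜃᜒ" := rfl

@[simp] theorem bayR_ke : bayChars.get? ['k', 'e'] = some "ᜃᜒ" := rfl

@[simp] theorem bayR_gi : bayChars.get? ['g', 'i'] = some "ᜄᜒ" := rfl

@[simp] theorem bayR_ge : bayChars.get? ['g', 'e'] = some "ᜄᜒ" := rfl

@[simp] theorem bayR_ngi : bayChars.get? ['n', 'g', 'i'] = some "ᜅᜒ" := rfl

@[simp] theorem bayR_nge : bayChars.get? ['n', 'g', 'e'] = some "ᜅᜒ" := rfl

@[simp] theorem bayR_ti : bayChars.get? ['t', 'i'] = some "ᜆᜒ" := rfl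

@[simp] theorem bayR_te : bayChars.get? ['t', 'e'] = some "ᜆᜒ" := rfl

@[simp] theorem bayR_di : bayChars.get? ['d', 'i'] = some "ᜇᜒ" := rfl

@[simp] theorem bayR_de : bayChars.get? ['d', 'e'] = some "ᜇᜒ" := rfl

@[simp] theorem bayR_ri : bayChars.get? ['r', 'i'] = some "ᜇᜒ" := rfl

@[simp] theorem bayR_re : bayChars.get? ['r', 'e'] = some "ᜇᜒ" := rfl

@[simp] theorem bayR_ni : bayChars.get? ['n', 'i'] = some "ᜈᜒ" := rfl

@[simp] theorem bayR_ne : bayChars.get? ['n', 'e'] = some "ᜈᜒ" := rfl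

@[simp] theorem bayR_pi : bayChars.get? ['p', 'i'] = some "ᜉᜒ" := rfl

@[simp] theorem bayR_pe : bayChars.get? ['p', 'e'] = some "ᜉᜒ" := rfl

@[simp] theorem bayR_bi : bayChars.get? ['b', 'i'] = some "ᜊᜒ" := rfl

@[simp] theorem bayR_be : bayChars.get? ['b', 'e'] = some "ᜊᜒ" := rfl

@[simp] theorem bayR_mi : bayChars.get? ['m', 'i'] = some "ᜋᜒ" := rfl

@[simp] theorem bayR_me : bayChars.get? ['m', 'e'] = some "ᜋᜒ" := rfl

@[simp] theorem bayR_yi : bayChars.get? ['y', 'i'] = some "ᜌᜒ" := rfl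

@[simp] theorem bayR_ye : bayChars.get? ['y', 'e'] = some "ᜌᜒ" := rfl

@[simp] theorem bayR_li : bayChars.get? ['l', 'i'] = some "ᜎᜒ" := rfl

@[simp] theorem bayR_le : bayChars.get? ['l', 'e'] = some "ᜎᜒ" := rfl

@[simp] theorem bayR_wi : bayChars.get? ['w', 'i'] = some "ᜏᜒ" := rfl

@[simp] theorem bayR_we : bayChars.get? ['w', 'e'] = some "ᜏᜒ" := rfl

@[simp] theorem bayR_si : bayChars.get? ['s', 'i'] = some "ᜐᜒ" := rfl

@[simp] theorem bayR_se : bayChars.get? ['s', 'e'] = some "ᜐᜒ" := rfl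

@[simp] theorem bayR_hi : bayChars.get? ['h', 'i'] = some "ᜑᜒ" := rfl

@[simp] theorem bayR_he : bayChars.get? ['h', 'e'] = some "ᜑᜒ" := rfl

@[simp] theorem bayR_ku : bayChars.get? ['k', 'u'] = some "ᜃᜓ" := rfl

@[simp] theorem bayR_ko : bayChars.get? ['k', 'o'] = some "ᜃᜓ" := rfl

@[simp] theorem bayR_gu : bayChars.get? ['g', 'u'] = some "ᜄᜓ" := rfl

@[simp] theorem bayR_go : bayChars.get? ['g', 'o'] = some "ᜄᜓ" := rfl

@[simp] theorem bayR_ngu : bayChars.get? ['n', 'g', 'u'] = some "ᜅᜓ" := rfl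

@[simp] theorem bayR_ngo : bayChars.get? ['n', 'g', 'o'] = some "ᜅᜓ" := rfl

@[simp] theorem bayR_tu : bayChars.get? ['t', 'u'] = some "ᜆᜓ" := rfl

@[simp] theorem bayR_to : bayChars.get? ['t', 'o'] = some "ᜆᜓ" := rfl

@[simp] theorem bayR_du : bayChars.get? ['d', 'u'] = some "ᜇᜓ" := rfl

@[simp] theorem bayR_do : bayChars.get? ['d', 'o'] = some "ᜇᜓ" := rfl

@[simp] theorem bayR_ru : bayChars.get? ['r', 'u'] = some "ᜇᜓ" := rfl

@[simp] theorem bayR_ro : bayChars.get? ['r', 'o'] = some "ᜇᜓ" := rfl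

@[simp] theorem bayR_nu : bayChars.get? ['n', 'u'] = some "ᜈᜓ" := rfl

@[simp] theorem bayR_no : bayChars.get? ['n', 'o'] = some "ᜈᜓ" := rfl

@[simp] theorem bayR_pu : bayChars.get? ['p', 'u'] = some "ᜉᜓ" := rfl

@[simp] theorem bayR_po : bayChars.get? ['p', 'o'] = some "ᜉᜓ" := rfl

@[simp] theorem bayR_bu : bayChars.get? ['b', 'u'] = some "ᜊᜓ" := rfl

@[simp] theorem bayR_bo : bayChars.get? ['b', 'o'] = some "ᜊᜓ" := rfl

@[simp] theorem bayR_mu : bayChars.get? ['m', 'u'] = some "ᜋᜓ" := rfl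

@[simp] theorem bayR_mo : bayChars.get? ['m', 'o'] = some "ᜋᜓ" := rfl

@[simp] theorem bayR_yu : bayChars.get? ['y', 'u'] = some "ᜌᜓ" := rfl

@[simp] theorem bayR_yo : bayChars.get? ['y', 'o'] = some "ᜌᜓ" := rfl

@[simp] theorem bayR_lu : bayChars.get? ['l', 'u'] = some "ᜎᜓ" := rfl

@[simp] theorem bayR_lo : bayChars.get? ['l', 'o'] = some "ᜎᜓ" := rfl

@[simp] theorem bayR_wu : bayChars.get? ['w', 'u'] = some "ᜏᜓ" := rfl

@[simp] theorem bayR_wo : bayChars.get? ['w', 'o'] = some "ᜏᜓ" := rfl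

@[simp] theorem bayR_su : bayChars.get? ['s', 'u'] = some "ᜐᜓ" := rfl

@[simp] theorem bayR_so : bayChars.get? ['s', 'o'] = some "ᜐᜓ" := rfl

@[simp] theorem bayR_hu : bayChars.get? ['h', 'u'] = some "ᜑᜓ" := rfl

@[simp] theorem bayR_ho : bayChars.get? ['h', 'o'] = some "ᜑᜓ" := rfl

@[simp] theorem bayR_k : bayChars.get? ['k'] = some "ᜃ᜔" := rfl

@[simp] theorem bayR_g : bayChars.get? ['g'] = some "ᜄ᜔" := rfl

@[simp] theorem bayR_ng : bayChars.get? ['n', 'g'] = some "ᜅ᜔" := rfl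

@[simp] theorem bayR_t : bayChars.get? ['t'] = some "ᜆ᜔" := rfl

@[simp] theorem bayR_d : bayChars.get? ['d'] = some "ᜇ᜔" := rfl

@[simp] theorem bayR_r : bayChars.get? ['r'] = some "ᜇ᜔" := rfl

@[simp] theorem bayR_n : bayChars.get? ['n'] = some "ᜈ᜔" := rfl

@[simp] theorem bayR_p : bayChars.get? ['p'] = some "ᜉ᜔" := rfl

@[simp] theorem bayR_b : bayChars.get? ['b'] = some "ᜊ᜔" := rfl

@[simp] theorem bayR_m : bayChars.get? ['m'] = some "ᜋ᜔" := rfl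

@[simp] theorem bayR_y : bayChars.get? ['y'] = some "ᜌ᜔" := rfl

@[simp] theorem bayR_l : bayChars.get? ['l'] = some "ᜎ᜔" := rfl

@[simp] theorem bayR_w : bayChars.get? ['w'] = some "ᜏ᜔" := rfl

@[simp] theorem bayR_s : bayChars.get? ['s'] = some "ᜐ᜔" := rfl

@[simp] theorem bayR_h : bayChars.get? ['h'] = some "ᜑ᜔" := rfl

@[simp] theorem altR_base_k : altBase.get? ['k'] = some "ᜃ" := rfl

@[simp] theorem altR_base_g : altBase.get? ['g'] = some "ᜄ" := rfl

@[simp] theorem altR_base_ng : altBase.get? ['n', 'g'] = some "ᜅ" := rfl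

@[simp] theorem altR_base_t : altBase.get? ['t'] = some "ᜆ" := rfl

@[simp] theorem altR_base_d : altBase.get? ['d'] = some "ᜇ" := rfl

@[simp] theorem altR_base_r : altBase.get? ['r'] = some "ᜇ" := rfl

@[simp] theorem altR_base_n : altBase.get? ['n'] = some "ᜈ" := rfl

@[simp] theorem altR_base_p : altBase.get? ['p'] = some "ᜉ" := rfl

@[simp] theorem altR_base_b : altBase.get? ['b'] = some "ᜊ" := rfl

@[simp] theorem altR_base_m : altBase.get? ['m'] = some "ᜋ" := rfl

@[simp] theorem altR_base_y : altBase.get? ['y'] = some "ᜌ" := rfl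

@[simp] theorem altR_base_l : altBase.get? ['l'] = some "ᜎ" := rfl

@[simp] theorem altR_base_w : altBase.get? ['w'] = some "ᜏ" := rfl

@[simp] theorem altR_base_s : altBase.get? ['s'] = some "ᜐ" := rfl

@[simp] theorem altR_base_h : altBase.get? ['h'] = some "ᜑ" := rfl

@[simp] theorem altR_indep_a : altIndep.get? 'a' = some "ᜀ" := rfl

@[simp] theorem altR_indep_e : altIndep.get? 'e' = some "ᜁ" := rfl

@[simp] theorem altR_indep_i : altIndep.get? 'i' = some "ᜁ" := rfl

@[simp] theorem altR_indep_o : altIndep.get? 'o' = some "ᜂ" := rfl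

@[simp] theorem altR_indep_u : altIndep.get? 'u' = some "ᜂ" := rfl

@[simp] theorem altR_sign_a : altSign.get? 'a' = some "" := rfl

@[simp] theorem altR_sign_e : altSign.get? 'e' = some "ᜒ" := rfl

@[simp] theorem altR_sign_i : altSign.get? 'i' = some "ᜒ" := rfl

@[simp] theorem altR_sign_o : altSign.get? 'o' = some "ᜓ" := rfl

@[simp] theorem altR_sign_u : altSign.get? 'u' = some "ᜓ" := rfl

@[simp] theorem bay1_none (c : Char) (hck : 'k' ≠ c) (hcg : 'g' ≠ c) (hct : 't' ≠ c) (hcd : 'd' ≠ c) (hcr : 'r' ≠ c) (hcn : 'n' ≠ c) (hcp : 'p' ≠ c) (hcb : 'b' ≠ c) (hcm : 'm' ≠ c) (hcy : 'y' ≠ c) (hcl : 'l' ≠ c) (hcw : 'w' ≠ c) (hcs : 's' ≠ c) (hch : 'h' ≠ c) (ha : 'a' ≠ c) (he : 'e' ≠ c) (hi : 'i' ≠ c) (ho : 'o' ≠ c) (hu : 'u' ≠ c) :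
    bayChars.get? [c] = none := by
  simp [bayChars, PySem.Dict.get?, hck, hcg, hct, hcd, hcr, hcn, hcp, hcb, hcm, hcy, hcl, hcw, hcs, hch, ha, he, hi, ho, hu]

@[simp] theorem bayp_none_first (c d : Char) (xs : List Char) (hck : 'k' ≠ c) (hcg : 'g' ≠ c) (hct : 't' ≠ c) (hcd : 'd' ≠ c) (hcr : 'r' ≠ c) (hcn : 'n' ≠ c) (hcp : 'p' ≠ c) (hcb : 'b' ≠ c) (hcm : 'm' ≠ c) (hcy : 'y' ≠ c) (hcl : 'l' ≠ c) (hcw : 'w' ≠ c) (hcs : 's' ≠ c) (hch : 'h' ≠ c) :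
    bayChars.get? (c :: d :: xs) = none := by
  simp [bayChars, PySem.Dict.get?, hck, hcg, hct, hcd, hcr, hcn, hcp, hcb, hcm, hcy, hcl, hcw, hcs, hch]

@[simp] theorem bayp_none_c (c d : Char) (xs : List Char) (hn : 'n' ≠ c) (ha : 'a' ≠ d) (he : 'e' ≠ d) (hi : 'i' ≠ d) (ho : 'o' ≠ d) (hu : 'u' ≠ d) :
    bayChars.get? (c :: d :: xs) = none := by
  simp [bayChars, PySem.Dict.get?, hn, ha, he, hi, ho, hu]

@[simp] theorem bayp_none_d (c d : Char) (xs : List Char) (hg : 'g' ≠ d) (ha : 'a' ≠ d) (he : 'e' ≠ d) (hi : 'i' ≠ d) (ho : 'o' ≠ d) (hu : 'u' ≠ d) :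
    bayChars.get? (c :: d :: xs) = none := by
  simp [bayChars, PySem.Dict.get?, hg, ha, he, hi, ho, hu]

@[simp] theorem bay3_none_g (c d e : Char) (hg : 'g' ≠ d) :
    bayChars.get? [c, d, e] = none := by
  simp [bayChars, PySem.Dict.get?, hg]

@[simp] theorem bay3_ng_none (e : Char) (ha : 'a' ≠ e) (he : 'e' ≠ e) (hi : 'i' ≠ e) (ho : 'o' ≠ e) (hu : 'u' ≠ e) :
    bayChars.get? ['n', 'g', e] = none := by
  simp [bayChars, PySem.Dict.get?, ha, he, hi, ho, hu]

@[simp] theorem altBase1_none (c : Char) (hck : 'k' ≠ c) (hcg : 'g' ≠ c) (hct : 't' ≠ c) (hcd : 'd' ≠ c) (hcr : 'r' ≠ c) (hcn : 'n' ≠ c) (hcp : 'p' ≠ c) (hcb : 'b' ≠ c) (hcm : 'm' ≠ c) (hcy : 'y' ≠ c) (hcl : 'l' ≠ c) (hcw : 'w' ≠ c) (hcs : 's' ≠ c) (hch : 'h' ≠ c) :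
    altBase.get? [c] = none := by
  simp [altBase, PySem.Dict.get?, hck, hcg, hct, hcd, hcr, hcn, hcp, hcb, hcm, hcy, hcl, hcw, hcs, hch]

@[simp] theorem altIndep_none (c : Char) (ha : 'a' ≠ c) (he : 'e' ≠ c) (hi : 'i' ≠ c) (ho : 'o' ≠ c) (hu : 'u' ≠ c) :
    altIndep.get? c = none := by
  simp [altIndep, PySem.Dict.get?, ha, he, hi, ho, hu]

@[simp] theorem altSign_none (d : Char) (ha : 'a' ≠ d) (he : 'e' ≠ d) (hi : 'i' ≠ d) (ho : 'o' ≠ d) (hu : 'u' ≠ d) :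
    altSign.get? d = none := by
  simp [altSign, PySem.Dict.get?, ha, he, hi, ho, hu]

set_option maxHeartbeats 2000000 in
theorem go_eq (n : Nat) : ∀ l : List Char, l.length ≤ n → goA l = goB l := by
  induction n with
  | zero =>
    intro l h
    have hl : l = [] := List.eq_nil_of_length_eq_zero (Nat.le_zero.mp h)
    subst hl; simp [goA.eq_def, goB.eq_def]
  | succ n ih =>
    intro l h
    rcases l with _ | ⟨c, rest⟩
    · simp [goA.eq_def, goB.eq_def]
    · have hr : rest.length ≤ n := by simp at h; omega
      by_cases hsp : c = ' '
      · subst hsp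
        (rw [goA.eq_def, goB.eq_def]; simp [altStep, altBase, altIndep, altSign, PySem.Dict.get?]; (first
          | rfl
          | (exact ih _ (by first | assumption | (simp_all; try omega)))
          | (simp only [List.cons.injEq]; exact ⟨by decide, ih _ (by first | assumption | (simp_all; try omega))⟩)
          | (refine ⟨by decide, ih _ (by first | assumption | (simp_all; try omega))⟩)))
      by_cases hv : 'a' = c ∨ 'e' = c ∨ 'i' = c ∨ 'o' = c ∨ 'u' = c
      · rcases hv with rfl | rfl | rfl | rfl | rfl <;> rcases rest with _ | ⟨d, rest'⟩ <;> (rw [goA.eq_def, goB.eq_def]; simp [altStep]; (first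
          | rfl
          | (exact ih _ (by first | assumption | (simp_all; try omega)))
          | (simp only [List.cons.injEq]; exact ⟨by decide, ih _ (by first | assumption | (simp_all; try omega))⟩)
          | (refine ⟨by decide, ih _ (by first | assumption | (simp_all; try omega))⟩)))
      by_cases hn : 'n' = c
      · subst hn
        rcases rest with _ | ⟨d, rest'⟩
        · (rw [goA.eq_def, goB.eq_def]; simp [altStep]; (first
          | rfl
          | (exact ih _ (by first | assumption | (simp_all; try omega)))
          | (simp only [List.cons.injEq]; exact ⟨by decide, ih _ (by first | assumption | (simp_all; try omega))⟩)
          | (refine ⟨by decide, ih _ (by first | assumption | (simp_all; try omega))⟩)))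
        by_cases hd : 'g' = d
        · subst hd
          rcases rest' with _ | ⟨e, rest''⟩
          · (rw [goA.eq_def, goB.eq_def]; simp [altStep]; (first
          | rfl
          | (exact ih _ (by first | assumption | (simp_all; try omega)))
          | (simp only [List.cons.injEq]; exact ⟨by decide, ih _ (by first | assumption | (simp_all; try omega))⟩)
          | (refine ⟨by decide, ih _ (by first | assumption | (simp_all; try omega))⟩)))
          by_cases he : 'a' = e ∨ 'e' = e ∨ 'i' = e ∨ 'o' = e ∨ 'u' = e
          · rcases he with rfl | rfl | rfl | rfl | rfl <;> (rw [goA.eq_def, goB.eq_def]; simp [altStep]; (first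
          | rfl
          | (exact ih _ (by first | assumption | (simp_all; try omega)))
          | (simp only [List.cons.injEq]; exact ⟨by decide, ih _ (by first | assumption | (simp_all; try omega))⟩)
          | (refine ⟨by decide, ih _ (by first | assumption | (simp_all; try omega))⟩)))
          · push_neg at he
            obtain ⟨e1, e2, e3, e4, e5⟩ := he
            (rw [goA.eq_def, goB.eq_def]; simp [altStep, e1, e2, e3, e4, e5]; (first
          | rfl
          | (exact ih _ (by first | assumption | (simp_all; try omega)))
          | (simp only [List.cons.injEq]; exact ⟨by decide, ih _ (by first | assumption | (simp_all; try omega))⟩)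
          | (refine ⟨by decide, ih _ (by first | assumption | (simp_all; try omega))⟩)))
        by_cases hdv : 'a' = d ∨ 'e' = d ∨ 'i' = d ∨ 'o' = d ∨ 'u' = d
        · rcases hdv with rfl | rfl | rfl | rfl | rfl <;> rcases rest' with _ | ⟨e, rest''⟩ <;> (rw [goA.eq_def, goB.eq_def]; simp [altStep, hd, Ne.symm hd]; (first
          | rfl
          | (exact ih _ (by first | assumption | (simp_all; try omega)))
          | (simp only [List.cons.injEq]; exact ⟨by decide, ih _ (by first | assumption | (simp_all; try omega))⟩)
          | (refine ⟨by decide, ih _ (by first | assumption | (simp_all; try omega))⟩)))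
        · push_neg at hdv
          obtain ⟨d1, d2, d3, d4, d5⟩ := hdv
          (rw [goA.eq_def, goB.eq_def]; simp [altStep, hd, Ne.symm hd, d1, d2, d3, d4, d5]; (first
          | rfl
          | (exact ih _ (by first | assumption | (simp_all; try omega)))
          | (simp only [List.cons.injEq]; exact ⟨by decide, ih _ (by first | assumption | (simp_all; try omega))⟩)
          | (refine ⟨by decide, ih _ (by first | assumption | (simp_all; try omega))⟩)))
      by_cases hk : 'k' = c ∨ 'g' = c ∨ 't' = c ∨ 'd' = c ∨ 'r' = c ∨ 'p' = c ∨ 'b' = c ∨ 'm' = c ∨ 'y' = c ∨ 'l' = c ∨ 'w' = c ∨ 's' = c ∨ 'h' = c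
      · rcases hk with rfl | rfl | rfl | rfl | rfl | rfl | rfl | rfl | rfl | rfl | rfl | rfl | rfl <;>
        · rcases rest with _ | ⟨d, rest'⟩
          · (rw [goA.eq_def, goB.eq_def]; simp [altStep]; (first
          | rfl
          | (exact ih _ (by first | assumption | (simp_all; try omega)))
          | (simp only [List.cons.injEq]; exact ⟨by decide, ih _ (by first | assumption | (simp_all; try omega))⟩)
          | (refine ⟨by decide, ih _ (by first | assumption | (simp_all; try omega))⟩)))
          by_cases hdv : 'a' = d ∨ 'e' = d ∨ 'i' = d ∨ 'o' = d ∨ 'u' = d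
          · rcases hdv with rfl | rfl | rfl | rfl | rfl <;> rcases rest' with _ | ⟨e, rest''⟩ <;> (rw [goA.eq_def, goB.eq_def]; simp [altStep]; (first
          | rfl
          | (exact ih _ (by first | assumption | (simp_all; try omega)))
          | (simp only [List.cons.injEq]; exact ⟨by decide, ih _ (by first | assumption | (simp_all; try omega))⟩)
          | (refine ⟨by decide, ih _ (by first | assumption | (simp_all; try omega))⟩)))
          · push_neg at hdv
            obtain ⟨d1, d2, d3, d4, d5⟩ := hdv
            (rw [goA.eq_def, goB.eq_def]; simp [altStep, d1, d2, d3, d4, d5]; (first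
          | rfl
          | (exact ih _ (by first | assumption | (simp_all; try omega)))
          | (simp only [List.cons.injEq]; exact ⟨by decide, ih _ (by first | assumption | (simp_all; try omega))⟩)
          | (refine ⟨by decide, ih _ (by first | assumption | (simp_all; try omega))⟩)))
      · push_neg at hv
        push_neg at hk
        obtain ⟨v1, v2, v3, v4, v5⟩ := hv
        obtain ⟨k1, k2, k3, k4, k5, k6, k7, k8, k9, k10, k11, k12, k13⟩ := hk
        rcases rest with _ | ⟨d, rest'⟩ <;>
          (rw [goA.eq_def, goB.eq_def]; simp [altStep, hsp, hn, Ne.symm hn, v1, v2, v3, v4, v5, k1, k2, k3, k4, k5, k6, k7, k8, k9, k10, k11, k12, k13]; (first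
          | rfl
          | (exact ih _ (by first | assumption | (simp_all; try omega)))
          | (simp only [List.cons.injEq]; exact ⟨by decide, ih _ (by first | assumption | (simp_all; try omega))⟩)
          | (refine ⟨by decide, ih _ (by first | assumption | (simp_all; try omega))⟩)))

-- ===== VERDICT (by name: the statement is the Claim_ definition above) =====
theorem latin_to_baybayin_spec : Claim_equal_latin_to_baybayin := by
  intro text _
  unfold Spec_latin_to_baybayin latin_to_baybayin latin_to_baybayin_alt
  rw [go_eq (PySem.Str.lower text).toList.length _ le_rfl]
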